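-- pv_equiv track=rewrite | github.com/starryboram/Algorithm | Programmers/Level2/13. 귤 고르기.py | solution
-- ===== SOURCE A (Python) =====
-- import heapq
--
-- def solution(k, tangerine):
--     set_tangerine = set(tangerine)
--     arr = []
--     heapq.heapify(arr)
--     for i in set_tangerine:
--         heapq.heappush(arr, tangerine.count(i))
--
--     cnt = 0
--     sum = 0
--     arr.sort()
--
--     if arr[-1] >= k:
--         return 1
--     else:
--         for i in arr[-1::-1]:
--             sum += i
--             cnt += 1
--             if sum >= k:
--                 return cnt
-- ===== SOURCE B (Python) =====
-- def solution(k, tangerine):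
--     # Count frequencies, then bucket the distinct types by their frequency
--     # (count-of-counts) and take whole buckets from the largest frequency down,
--     # finishing the last bucket with a ceiling division -- no comparison sort.
--     freq = {}
--     for t in tangerine:
--         freq[t] = freq.get(t, 0) + 1
--     buckets = {}
--     for c in freq.values():
--         buckets[c] = buckets.get(c, 0) + 1
--     types = 0
--     remaining = max(k, 1)  # at least one type is always picked
--     for c in range(len(tangerine), 0, -1):
--         m = buckets.get(c, 0)
--         if m == 0:
--             continue
--         need = -(-remaining // c)
--         if need <= m:
--             return types + need
--         types += m
--         remaining -= m * c
-- ===== Notes on version B (the rewrite author's own statement) =====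
-- stated objective: faster
-- what changed: Replaces A's per-distinct-element tangerine.count scans and heap-push-then-sort greedy over individual counts by a counting-sort-style algorithm: a count-of-counts table consumed bucket by bucket from the largest frequency down, finishing the last bucket with one ceiling division instead of walking its types one at a time.
-- outside the precondition, e.g. on solution(3, [1, 1]): A returns None, B returns None; on solution(1, []): A raises IndexError, B returns None
import Mathlib
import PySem

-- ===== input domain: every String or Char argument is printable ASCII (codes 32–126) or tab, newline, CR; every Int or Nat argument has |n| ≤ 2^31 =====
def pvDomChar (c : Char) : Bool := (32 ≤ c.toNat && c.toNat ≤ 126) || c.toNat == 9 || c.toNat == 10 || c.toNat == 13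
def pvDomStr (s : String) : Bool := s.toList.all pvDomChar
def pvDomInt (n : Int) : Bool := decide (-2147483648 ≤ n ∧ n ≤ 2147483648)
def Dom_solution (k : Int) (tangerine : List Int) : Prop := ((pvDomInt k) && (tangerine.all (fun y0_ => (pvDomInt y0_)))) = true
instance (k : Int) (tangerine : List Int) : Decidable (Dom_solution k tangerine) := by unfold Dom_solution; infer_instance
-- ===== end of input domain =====

-- B replaces A's per-distinct-element list.count scans and heap-push-then-sort greedy by a
-- count-of-counts bucket table consumed from the largest frequency down with one ceiling
-- division per bucket (measured faster; no comparison sort).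


-- ===== PORT A =====
-- Hand port of CPython's heapq._siftdown (sift-up after append), exact step for step: the
-- getD default 0 is never read because heappush only passes in-range positions.
def pvSiftdown (heap : List Int) (startpos pos : Nat) (newitem : Int) : List Int :=
  if h : startpos < pos then
    let parentpos := (pos - 1) / 2
    let parent := heap.getD parentpos 0
    if newitem < parent then
      pvSiftdown (heap.set pos parent) startpos parentpos newitem
    else
      heap.set pos newitem
  else
    heap.set pos newitem
termination_by pos
decreasing_by exact Nat.lt_of_le_of_lt (Nat.div_le_self _ _) (Nat.sub_lt (Nat.lt_of_le_of_lt (Nat.zero_le _) h) Nat.one_pos)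

-- heapq.heappush: append, then sift up from the last position.
def pvHeappush (heap : List Int) (item : Int) : List Int :=
  pvSiftdown (heap ++ [item]) 0 heap.length item

-- A's accumulation loop over arr[-1::-1]; none = the loop falls off (Python returns None).
def pvLoopA (k s cnt : Int) : List Int → Option Int
  | [] => none
  | i :: rest =>
    let s' := s + i
    let cnt' := cnt + 1
    if k ≤ s' then some cnt' else pvLoopA k s' cnt' rest

def solution (k : Int) (tangerine : List Int) : Int :=
  let setTangerine : PySem.Set Int := PySem.Set.ofList tangerine
  let arr := setTangerine.foldl (fun a i => pvHeappush a ((tangerine.count i : Int))) []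
  let arrS := PySem.List.sorted arr (fun x => x) false
  match PySem.List.pyGet? arrS (-1) with
  | none => 0      -- arr[-1] raises IndexError in Python (empty tangerine): outside Pre_
  | some last =>
    if k ≤ last then 1
    else
      match pvLoopA k 0 0 ((PySem.List.slice? arrS none none (-1)).getD []) with
      | some cnt => cnt
      | none => 0  -- Python returns None here (k > len(tangerine)): outside Pre_

-- ===== PORT B =====
-- B's bucket loop over c = len(tangerine) .. 1; none = the loop falls off (Python None).
def pvBucketLoop (d : PySem.Dict Int Int) : List Int → Int → Int → Option Int
  | [], _, _ => none
  | c :: rest, types, remaining =>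
    let m := d.getD c 0
    if m = 0 then pvBucketLoop d rest types remaining
    else
      let need := -(PySem.Int.floordiv (-remaining) c)
      if need ≤ m then some (types + need)
      else pvBucketLoop d rest (types + m) (remaining - m * c)

def solution_alt (k : Int) (tangerine : List Int) : Int :=
  let freq := tangerine.foldl (fun d t => d.insert t (d.getD t 0 + 1)) (PySem.Dict.empty)
  let buckets := freq.values.foldl (fun d c => d.insert c (d.getD c 0 + 1)) (PySem.Dict.empty)
  match pvBucketLoop buckets (PySem.List.pyRange (tangerine.length : Int) 0 (-1)) 0 (max k 1) with
  | some n => n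
  | none => 0    -- Python returns None here (k > len(tangerine)): outside Pre_

-- ===== PRECONDITION & SPEC =====
-- Pre_ excludes: the empty list, where A raises IndexError at arr[-1], and k > len(tangerine),
-- where A falls off its loop and returns None instead of an int (B returns None there too).
def Pre_solution (k : Int) (tangerine : List Int) : Prop :=
  tangerine ≠ [] ∧ k ≤ (tangerine.length : Int)
instance (k : Int) (tangerine : List Int) : Decidable (Pre_solution k tangerine) := by unfold Pre_solution; infer_instance

def pvWitness_solution : Int × List Int := (3, [1, 2, 1, 3])

def Spec_solution (k : Int) (tangerine : List Int) (out : Int) : Prop := out = solution_alt k tangerine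
instance (k : Int) (tangerine : List Int) (out : Int) : Decidable (Spec_solution k tangerine out) := by unfold Spec_solution; infer_instance

-- ===== CLAIM (what is proved, stated in full; the proofs are below) =====
def Claim_equal_solution : Prop := ∀ (k : Int) (tangerine : List Int), Dom_solution k tangerine → Pre_solution k tangerine → Spec_solution k tangerine (solution k tangerine)

-- ===== LEMMAS AND PROOFS =====

-- setting position i is, up to permutation, dropping position i and consing the new value
theorem pv_set_perm (l : List Int) (i : Nat) (a : Int) (h : i < l.length) :
    (l.set i a).Perm (a :: l.eraseIdx i) := by
  induction l generalizing i with
  | nil => simp at h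
  | cons x t ih =>
    cases i with
    | zero => simp
    | succ j =>
      simp only [List.set_cons_succ, List.eraseIdx_cons_succ]
      exact ((ih j (by simpa using h)).cons x).trans (List.Perm.swap a x _)

-- overwriting q with l[p] and then p with a is, up to permutation, just overwriting q with a
theorem pv_swap_perm (l : List Int) (p q : Nat) (a : Int) (hpq : p < q) (hq : q < l.length) :
    ((l.set q (l.getD p 0)).set p a).Perm (l.set q a) := by
  induction l generalizing p q with
  | nil => simp at hq
  | cons x t ih =>
    cases q with
    | zero => omega
    | succ q' =>
      cases p with
      | zero =>
        simp only [List.getD_cons_zero, List.set_cons_succ, List.set_cons_zero]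
        have hq' : q' < t.length := by simpa using hq
        have h1 := pv_set_perm t q' x hq'
        have h2 := pv_set_perm t q' a hq'
        exact ((h1.cons a).trans (List.Perm.swap x a _)).trans (h2.symm.cons x)
      | succ p' =>
        simp only [List.getD_cons_succ, List.set_cons_succ]
        exact (ih p' q' (by omega) (by simpa using hq)).cons x

theorem pv_siftdown_perm : ∀ (pos : Nat) (heap : List Int) (startpos : Nat) (newitem : Int),
    pos < heap.length → (pvSiftdown heap startpos pos newitem).Perm (heap.set pos newitem) := by
  intro pos
  induction pos using Nat.strong_induction_on with
  | _ pos ih =>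
    intro heap startpos newitem hpos
    rw [pvSiftdown]
    by_cases h : startpos < pos
    · simp only [dif_pos h]
      have hpp : (pos - 1) / 2 < pos :=
        Nat.lt_of_le_of_lt (Nat.div_le_self _ _) (Nat.sub_lt (Nat.lt_of_le_of_lt (Nat.zero_le _) h) Nat.one_pos)
      by_cases hlt : newitem < heap.getD ((pos - 1) / 2) 0
      · simp only [if_pos hlt]
        exact (ih _ hpp _ _ _ (by simpa using hpp.trans hpos)).trans
          (pv_swap_perm heap ((pos - 1) / 2) pos newitem hpp hpos)
      · simp only [if_neg hlt]
        exact List.Perm.refl _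
    · simp only [dif_neg h]
      exact List.Perm.refl _

theorem pv_set_append_singleton (l : List Int) (a b : Int) :
    (l ++ [a]).set l.length b = l ++ [b] := by
  induction l with
  | nil => rfl
  | cons x t ih => simp [ih]

theorem pv_heappush_perm (heap : List Int) (item : Int) :
    (pvHeappush heap item).Perm (heap ++ [item]) := by
  have h := pv_siftdown_perm heap.length (heap ++ [item]) 0 item (by simp)
  rwa [pv_set_append_singleton] at h

theorem pv_foldl_heappush_perm (l : List Int) (f : Int → Int) (acc : List Int) :
    (l.foldl (fun a i => pvHeappush a (f i)) acc).Perm (acc ++ l.map f) := by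
  induction l generalizing acc with
  | nil => simp
  | cons x t ih =>
    simp only [List.foldl_cons, List.map_cons]
    refine (ih (pvHeappush acc (f x))).trans ?_
    have := (pv_heappush_perm acc (f x)).append_right (t.map f)
    simpa using this

-- B's frequency dict is Counter(tangerine); its values are the counts of the distinct elements
theorem pv_values_eq (t : List Int) :
    (t.foldl (fun d x => d.insert x (d.getD x 0 + 1)) (PySem.Dict.empty)).values
      = (PySem.Set.ofList t).map (fun x => (t.count x : Int)) := by
  rw [PySem.Dict.foldl_insert_getD_add_one_eq_counter]
  simp only [PySem.Dict.values, PySem.Dict.items_counter, List.map_map]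
  simp [Function.comp]

-- descending sort is the reverse of the ascending sort (Int elements, identity key)
theorem pv_sorted_rev_eq (xs : List Int) :
    PySem.List.sorted xs (fun x => x) true = (PySem.List.sorted xs (fun x => x) false).reverse := by
  refine PySem.List.eq_of_perm_of_pairwise_le_of_injective (fun x : Int => -x) neg_injective ?_ ?_ ?_
  · exact (PySem.List.sorted_perm xs (fun x => x) true).trans
      ((PySem.List.sorted_perm xs (fun x => x) false).symm.trans (List.reverse_perm _).symm)
  · exact (PySem.List.sorted_pairwise_rev xs (fun x => x)).imp (by intro a b hab; dsimp only; omega)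
  · exact ((List.pairwise_reverse).2 (PySem.List.sorted_pairwise xs (fun x => x))).imp
      (by intro a b hab; dsimp only; omega)

-- ceiling division bracket: -((-r) // c) ≤ m ↔ r ≤ m*c  (c ≥ 1)
theorem pv_ceil_le (r m c : Int) (hc : 1 ≤ c) :
    (-(PySem.Int.floordiv (-r) c) ≤ m) ↔ r ≤ m * c := by
  have h := (PySem.Int.le_floordiv_iff_mul_le (a := -r) (b := c) (q := -m) (by omega))
  constructor
  · intro hle
    have := h.1 (by omega)
    nlinarith
  · intro hle
    have : -m * c ≤ -r := by nlinarith
    have := h.2 this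
    omega

-- peeling one full block of size c off the ceiling: ceil((r-c)/c) = ceil(r/c) - 1
theorem pv_ceil_sub (r c : Int) (hc : 1 ≤ c) :
    -(PySem.Int.floordiv (-(r - c)) c) = -(PySem.Int.floordiv (-r) c) - 1 := by
  rw [PySem.Int.floordiv_eq_ediv_of_pos (by omega), PySem.Int.floordiv_eq_ediv_of_pos (by omega)]
  have he : -(r - c) = -r + 1 * c := by ring
  rw [he, Int.add_mul_ediv_right _ _ (by omega : c ≠ 0)]
  ring

-- A's one-at-a-time loop, run through a block of n equal counts c, is one ceiling division
theorem pv_replicate_step (k c : Int) (hc : 1 ≤ c) :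
    ∀ (n : Nat) (s types : Int) (rest : List Int), 1 ≤ k - s →
    pvLoopA k s types (List.replicate n c ++ rest)
      = if -(PySem.Int.floordiv (-(k - s)) c) ≤ (n : Int)
        then some (types + -(PySem.Int.floordiv (-(k - s)) c))
        else pvLoopA k (s + n * c) (types + n) rest := by
  intro n
  induction n with
  | zero =>
    intro s types rest hs
    have hfalse : ¬ (-(PySem.Int.floordiv (-(k - s)) c) ≤ ((0 : Nat) : Int)) := by
      rw [pv_ceil_le _ _ _ hc]
      push_cast
      omega
    rw [if_neg hfalse]
    simp
  | succ n ih =>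
    intro s types rest hs
    rw [List.replicate_succ, List.cons_append]
    show (if k ≤ s + c then some (types + 1)
          else pvLoopA k (s + c) (types + 1) (List.replicate n c ++ rest)) = _
    by_cases hk : k ≤ s + c
    · have hceil1 : -(PySem.Int.floordiv (-(k - s)) c) = 1 := by
        have h1 : -(PySem.Int.floordiv (-(k - s)) c) ≤ 1 := (pv_ceil_le _ _ _ hc).2 (by omega)
        have h0 : ¬ (-(PySem.Int.floordiv (-(k - s)) c) ≤ 0) := by
          rw [pv_ceil_le _ _ _ hc]; omega
        omega
      have hcond : -(PySem.Int.floordiv (-(k - s)) c) ≤ ((n + 1 : Nat) : Int) := by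
        rw [hceil1]; push_cast; omega
      rw [if_pos hk, if_pos hcond, hceil1]
    · have hs' : 1 ≤ k - (s + c) := by omega
      rw [if_neg hk, ih (s + c) (types + 1) rest hs']
      have hsub : -(PySem.Int.floordiv (-(k - (s + c))) c)
          = -(PySem.Int.floordiv (-(k - s)) c) - 1 := by
        have := pv_ceil_sub (k - s) c hc
        rw [show k - (s + c) = (k - s) - c by ring, this]
      rw [hsub]
      by_cases hcond : -(PySem.Int.floordiv (-(k - s)) c) - 1 ≤ (n : Int)
      · rw [if_pos hcond, if_pos (by push_cast; omega)]
        congr 1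
        omega
      · rw [if_neg hcond, if_neg (by push_cast; omega)]
        congr 1 <;> push_cast <;> ring

-- A's loop over the concatenated blocks equals B's bucket loop
theorem pv_loop_buckets (k : Int) (d : PySem.Dict Int Int) (f : Int → Nat) :
    ∀ (cs : List Int) (s types : Int), 1 ≤ k - s →
      (∀ c ∈ cs, 1 ≤ c ∧ d.getD c 0 = (f c : Int)) →
      pvLoopA k s types (cs.flatMap (fun c => List.replicate (f c) c))
        = pvBucketLoop d cs types (k - s) := by
  intro cs
  induction cs with
  | nil => intro s types hs _; rfl
  | cons c rest ih =>
    intro s types hs hall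
    obtain ⟨hc, hm⟩ := hall c (by simp)
    have hrest : ∀ c' ∈ rest, 1 ≤ c' ∧ d.getD c' 0 = (f c' : Int) := fun c' h' => hall c' (by simp [h'])
    rw [List.flatMap_cons, pv_replicate_step k c hc (f c) s types _ hs]
    show _ = pvBucketLoop d (c :: rest) types (k - s)
    rw [pvBucketLoop]
    simp only [hm]
    by_cases hz : (f c : Int) = 0
    · have hz' : f c = 0 := by exact_mod_cast hz
      have hfalse : ¬ (-(PySem.Int.floordiv (-(k - s)) c) ≤ ((f c : Nat) : Int)) := by
        rw [hz', pv_ceil_le _ _ _ hc]; push_cast; omega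
      rw [if_neg hfalse, if_pos hz, ← ih s types hs hrest]
      simp [hz']
    · rw [if_neg hz]
      by_cases hcond : -(PySem.Int.floordiv (-(k - s)) c) ≤ ((f c : Nat) : Int)
      · rw [if_pos hcond, if_pos hcond]
      · rw [if_neg hcond, if_neg hcond]
        have hbig : ¬ (k - s ≤ (f c : Int) * c) := by
          rw [← pv_ceil_le _ _ _ hc]; exact hcond
        have hs' : 1 ≤ k - (s + (f c : Int) * c) := by omega
        rw [ih (s + (f c : Int) * c) (types + (f c : Int)) hs' hrest]
        congr 1
        ring

-- the descending sorted count list is the concatenation of the count-of-counts buckets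
theorem pv_flat_perm : ∀ (L : Nat) (vs : List Int), (∀ x ∈ vs, 1 ≤ x ∧ x ≤ (L : Int)) →
    ((PySem.List.pyRange (L : Int) 0 (-1)).flatMap
      (fun c => List.replicate (vs.count c) c)).Perm vs := by
  intro L
  induction L with
  | zero =>
    intro vs h
    have hnil : vs = [] := by
      cases vs with
      | nil => rfl
      | cons x t => exact absurd (h x (by simp)) (by push_cast; omega)
    rw [hnil, PySem.List.pyRange_neg_one_eq_nil (by norm_num)]
    rfl
  | succ L ih =>
    intro vs h
    have hcons : PySem.List.pyRange ((L + 1 : Nat) : Int) 0 (-1)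
        = ((L + 1 : Nat) : Int) :: PySem.List.pyRange ((L : Nat) : Int) 0 (-1) := by
      rw [PySem.List.pyRange_neg_one_cons (by push_cast; omega)]
      push_cast
      ring_nf
    rw [hcons, List.flatMap_cons]
    set vs' := vs.filter (fun x => decide (x ≠ ((L + 1 : Nat) : Int))) with hvs'
    have htail : (PySem.List.pyRange ((L : Nat) : Int) 0 (-1)).flatMap
          (fun c => List.replicate (vs.count c) c)
        = (PySem.List.pyRange ((L : Nat) : Int) 0 (-1)).flatMap
          (fun c => List.replicate (vs'.count c) c) := by
      apply List.flatMap_congr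
      intro c hcmem
      have hcb := (PySem.List.mem_pyRange_neg_one).1 hcmem
      have hne : (decide (c ≠ ((L + 1 : Nat) : Int)) = true) := by
        simp only [decide_eq_true_eq]
        push_cast
        omega
      have hcount : List.count c (vs.filter (fun x => decide (x ≠ ((L + 1 : Nat) : Int))))
          = List.count c vs :=
        List.count_filter (p := fun x => decide (x ≠ ((L + 1 : Nat) : Int))) hne
      rw [hvs', hcount]
    have hperm' : ((PySem.List.pyRange ((L : Nat) : Int) 0 (-1)).flatMap
        (fun c => List.replicate (vs'.count c) c)).Perm vs' := by
      apply ih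
      intro x hx
      rw [hvs'] at hx
      have hmem := List.mem_filter.1 hx
      have hb := h x hmem.1
      have hne : x ≠ ((L + 1 : Nat) : Int) := by simpa using hmem.2
      constructor
      · exact hb.1
      · have := hb.2
        push_cast at this ⊢
        omega
    have hhead : List.replicate (vs.count ((L + 1 : Nat) : Int)) ((L + 1 : Nat) : Int)
        = vs.filter (fun x => x == ((L + 1 : Nat) : Int)) := (List.filter_beq (l := vs) _).symm
    rw [htail, hhead]
    refine List.Perm.trans (List.Perm.append (List.Perm.refl _) hperm') ?_
    have := List.filter_append_perm (fun x => x == ((L + 1 : Nat) : Int)) vs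
    refine List.Perm.trans ?_ this
    apply List.Perm.append (List.Perm.refl _)
    apply List.Perm.of_eq
    rw [hvs']
    apply List.filter_congr
    intro x _
    simp [ne_eq, decide_not, beq_eq_decide]

theorem pv_flat_pairwise : ∀ (L : Nat) (vs : List Int),
    ((PySem.List.pyRange (L : Nat) 0 (-1)).flatMap
      (fun c => List.replicate (vs.count c) c)).Pairwise (· ≥ ·) := by
  intro L
  induction L with
  | zero =>
    intro vs
    rw [PySem.List.pyRange_neg_one_eq_nil (by norm_num)]
    exact List.Pairwise.nil
  | succ L ih =>
    intro vs
    have hcons : PySem.List.pyRange ((L + 1 : Nat) : Int) 0 (-1)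
        = ((L + 1 : Nat) : Int) :: PySem.List.pyRange ((L : Nat) : Int) 0 (-1) := by
      rw [PySem.List.pyRange_neg_one_cons (by push_cast; omega)]
      push_cast
      ring_nf
    rw [hcons, List.flatMap_cons]
    apply List.pairwise_append.2
    refine ⟨List.pairwise_replicate.2 (Or.inr le_rfl), ih vs, ?_⟩
    intro x hx y hy
    have hxv : x = ((L + 1 : Nat) : Int) := (List.eq_of_mem_replicate hx)
    obtain ⟨c, hcmem, hyrep⟩ := List.mem_flatMap.1 hy
    have hyv : y = c := List.eq_of_mem_replicate hyrep
    have hcb := (PySem.List.mem_pyRange_neg_one).1 hcmem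
    rw [hxv, hyv]
    push_cast
    omega

-- ===== VERDICT (by name: the statement is the Claim_ definition above) =====
theorem solution_spec : Claim_equal_solution := by
  intro k t _hdom hpre
  obtain ⟨hne, hklen⟩ := hpre
  unfold Spec_solution
  simp only [solution, solution_alt]
  rw [pv_values_eq]
  set vs : List Int := (PySem.Set.ofList t).map (fun x => (t.count x : Int)) with hvs
  -- bounds on the counts
  have hbounds : ∀ x ∈ vs, 1 ≤ x ∧ x ≤ (t.length : Int) := by
    intro x hx
    rw [hvs] at hx
    obtain ⟨y, hy, rfl⟩ := List.mem_map.1 hx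
    have hmem : y ∈ t := (PySem.Set.mem_ofList _ _).1 hy
    constructor
    · exact_mod_cast List.count_pos_iff.2 hmem
    · exact_mod_cast List.count_le_length
  -- A's heap is a permutation of vs, so its sort is the sort of vs
  have hperm : ((PySem.Set.ofList t).foldl (fun a i => pvHeappush a ((t.count i : Int))) []).Perm vs := by
    simpa using pv_foldl_heappush_perm (PySem.Set.ofList t) (fun i => (t.count i : Int)) []
  have hsortA : PySem.List.sorted ((PySem.Set.ofList t).foldl (fun a i => pvHeappush a ((t.count i : Int))) []) (fun x => x) false
      = PySem.List.sorted vs (fun x => x) false :=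
    PySem.List.sorted_eq_sorted_of_perm _ _ _ (fun a b h => h) hperm
  rw [hsortA]
  set asc : List Int := PySem.List.sorted vs (fun x => x) false with hasc
  -- the descending sort is the bucket concatenation
  set flat : List Int := (PySem.List.pyRange (t.length : Int) 0 (-1)).flatMap
      (fun c => List.replicate (vs.count c) c) with hflat
  have hdesc : asc.reverse = flat := by
    have h1 : PySem.List.sorted vs (fun x => x) true = asc.reverse := by
      rw [hasc, pv_sorted_rev_eq]
    rw [← h1, hflat]
    refine (PySem.List.eq_of_perm_of_pairwise_le_of_injective (fun x : Int => -x) neg_injective ?_ ?_ ?_).symm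
    · exact (pv_flat_perm t.length vs hbounds).trans (PySem.List.sorted_perm vs (fun x => x) true).symm
    · exact (pv_flat_pairwise t.length vs).imp (by intro a b hab; dsimp only; omega)
    · exact (PySem.List.sorted_pairwise_rev vs (fun x => x)).imp (by intro a b hab; dsimp only; omega)
  -- B's buckets dict reads out the counts of counts
  have hbuckets : ∀ c, ((vs.foldl (fun d c => d.insert c (d.getD c 0 + 1)) (PySem.Dict.empty)).getD c 0)
      = (vs.count c : Int) := by
    intro c
    rw [PySem.Dict.foldl_insert_getD_add_one_eq_counter, PySem.Dict.getD_counter]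
  have hall : ∀ c ∈ PySem.List.pyRange (t.length : Int) 0 (-1),
      1 ≤ c ∧ ((vs.foldl (fun d c => d.insert c (d.getD c 0 + 1)) (PySem.Dict.empty)).getD c 0)
        = ((vs.count c : Nat) : Int) := by
    intro c hc
    have hcb := (PySem.List.mem_pyRange_neg_one).1 hc
    exact ⟨by omega, hbuckets c⟩
  -- the descending list is nonempty; name its head
  have hvs_ne : vs ≠ [] := by
    obtain ⟨x, t', rfl⟩ := List.exists_cons_of_ne_nil hne
    have hx : x ∈ PySem.Set.ofList (x :: t') := (PySem.Set.mem_ofList _ _).2 (by simp)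
    simp only [hvs, ne_eq, List.map_eq_nil_iff]
    intro hnil
    rw [hnil] at hx
    exact List.not_mem_nil hx
  have hasc_ne : asc ≠ [] := by
    rw [hasc, ne_eq, PySem.List.sorted_eq_nil_iff]
    exact hvs_ne
  obtain ⟨last, rest, hrev⟩ := List.exists_cons_of_ne_nil (by simpa using hasc_ne : asc.reverse ≠ [])
  have hlast1 : 1 ≤ last := by
    have hmem : last ∈ asc := by
      rw [← List.mem_reverse, hrev]
      simp
    have : last ∈ vs := (PySem.List.sorted_perm vs (fun x => x) false).mem_iff.1 (hasc ▸ hmem)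
    exact (hbounds last this).1
  have hget : PySem.List.pyGet? asc (-1) = some last := by
    rw [PySem.List.pyGet?_neg_one, ← List.head?_reverse, hrev]
    rfl
  -- B's result is the one-at-a-time loop over the descending list, started at max k 1
  have hB : pvBucketLoop (vs.foldl (fun d c => d.insert c (d.getD c 0 + 1)) (PySem.Dict.empty))
        (PySem.List.pyRange (t.length : Int) 0 (-1)) 0 (max k 1)
      = pvLoopA (max k 1) 0 0 (last :: rest) := by
    rw [show (max k 1 : Int) = max k 1 - 0 by ring,
      ← pv_loop_buckets (max k 1) _ (fun c => vs.count c) _ 0 0 (by omega) hall,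
      ← hflat, ← hdesc, hrev]
    norm_num
  rw [hB]
  simp only [hget, PySem.List.slice?_none_none_neg_one, Option.getD_some, hrev]
  by_cases hk1 : 1 ≤ k
  · rw [max_eq_left (by omega)]
    by_cases hkl : k ≤ last
    · rw [if_pos hkl]
      show _ = (match (if k ≤ 0 + last then some (0 + 1 : Int) else _) with
        | some cnt => cnt | none => (0 : Int))
      rw [if_pos (by omega)]
      norm_num
    · rw [if_neg hkl]
  · -- k ≤ 0: A answers 1 via the max-count check; B picks one type of the largest count
    rw [if_pos (by omega), max_eq_right (by omega)]
    show (1 : Int) = (match (if (1 : Int) ≤ 0 + last then some (0 + 1 : Int) else _) with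
      | some cnt => cnt | none => (0 : Int))
    rw [if_pos (by omega)]
    norm_num
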